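-- pv_equiv track=rewrite | github.com/meduggit/CryptoAlgorithms | Hashing/HashingTesting/RoundTesting.py | enhanced_hash
-- ===== SOURCE A (Python) =====
-- def enhanced_hash(input_str, process_rounds=1, mixing_rounds=2):
--     rotation_amount = len(input_str) ** 2 % 32
--
--     def input_whitening(data):
--         return ''.join(format(ord(char), '08b') for char in data)
--
--     def mixing(binary_data, rotation_amount, rounds):
--         original = binary_data
--         for _ in range(rounds):
--             rotated = ((original << rotation_amount) | (original >> (32 - rotation_amount))) & 0xFFFFFFFFFFFFFFFFFFFFFFFFFFFFFFFF
--             original ^= rotated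
--         return original
--
--     def process_data(data):
--         state = [0x87033a211350c9a5682e25cc2fafb24a, 0x3eda649a22357ed19ba54dea2f73d94c, 0x7edd261d1afd9717422c61f275ec2cb8, 0x37e81ad125b939805a672be0039c902e, 0x87aa2973de76e28905c6e181d6f0b8f2, 0x2d65153481ad91425f27f25899716593]
--
--         for _ in range(process_rounds):
--             for char in data:
--                 bit = int(char)
--                 mixed_data = mixing(bit, rotation_amount, mixing_rounds)
--                 state[0] = (state[0] + mixed_data + (state[1] ^ state[2] ^ state[3])) & 0xFFFFFFFFFFFFFFFFFFFFFFFFFFFFFFFF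
--                 state[1] ^= (bit + state[0])
--                 state[2] = (state[1] << 7 | state[1] >> (32 - 7)) & 0xFFFFFFFFFFFFFFFFFFFFFFFFFFFFFFFF
--                 state[3] = (state[2] + (mixed_data * state[0]) + (state[5] ^ (bit >> 5) ^ (state[1] >> 3))) & 0xFFFFFFFFFFFFFFFFFFFFFFFFFFFFFFFF
--                 state[4] ^= (state[2] + bit)
--                 state[5] = (state[4] << 11 | state[3] >> (32 - 11)) & 0xFFFFFFFFFFFFFFFFFFFFFFFFFFFFFFFF
--
--
--         if rotation_amount < 16:
--             state[0], state[1], state[2], state[3], state[4], state[5] = state[3], state[2], state[1], state[0], state[5], state[4]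
--         else:
--             state[0], state[1], state[2], state[3], state[4], state[5] = state[1], state[3], state[5], state[0], state[2], state[4]
--
--         return state
--
--     def combine_state_variables(state):
--         state_integers = state
--         result = (state_integers[0] ^ state_integers[1] ^ state_integers[2] ^ state_integers[3] ^ state_integers[5] ^ state_integers[4]) & 0xFFFFFFFFFFFFFFFFFFFFFFFFFFFFFFFF
--         return hex(result)[2:].zfill(18)
--
--     binary_data = input_whitening(input_str)
--     processed_data = process_data(binary_data)
--     combined_states = combine_state_variables(processed_data)
--
--     return combined_states
-- ===== SOURCE B (Python) =====
-- def enhanced_hash(input_str, process_rounds=1, mixing_rounds=2):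
--     M = (1 << 128) - 1
--     rot = len(input_str) ** 2 % 32
--
--     def step(v):
--         return v ^ (((v << rot) | (v >> (32 - rot))) & M)
--
--     def mix_value(start):
--         # value of step applied mixing_rounds times to start, but computed by
--         # detecting the orbit's cycle and jumping ahead with modular arithmetic
--         # instead of looping mixing_rounds times
--         seen = {}
--         seq = []
--         v = start
--         k = 0
--         while k < mixing_rounds:
--             if v in seen:
--                 j = seen[v]
--                 return seq[j + (mixing_rounds - j) % (k - j)]
--             seen[v] = k
--             seq.append(v)
--             v = step(v)
--             k += 1
--         return v
--
--     # the mixed value depends only on the bit, computed once per bit value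
--     mixed = (mix_value(0), mix_value(1))
--
--     s0 = 0x87033a211350c9a5682e25cc2fafb24a
--     s1 = 0x3eda649a22357ed19ba54dea2f73d94c
--     s2 = 0x7edd261d1afd9717422c61f275ec2cb8
--     s3 = 0x37e81ad125b939805a672be0039c902e
--     s4 = 0x87aa2973de76e28905c6e181d6f0b8f2
--     s5 = 0x2d65153481ad91425f27f25899716593
--
--     for _ in range(process_rounds):
--         for ch in input_str:
--             code = ord(ch)
--             for i in range(8):
--                 bit = (code >> (7 - i)) & 1
--                 md = mixed[bit]
--                 s0 = (s0 + md + (s1 ^ s2 ^ s3)) & M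
--                 s1 ^= (bit + s0)
--                 s2 = ((s1 << 7) | (s1 >> 25)) & M
--                 s3 = (s2 + md * s0 + (s5 ^ (s1 >> 3))) & M  # bit>>5 == 0 for bit in {0,1}
--                 s4 ^= (s2 + bit)
--                 s5 = ((s4 << 11) | (s3 >> 21)) & M
--
--     # XOR is commutative, so A's final state permutation cannot change the digest
--     return hex((s0 ^ s1 ^ s2 ^ s3 ^ s4 ^ s5) & M)[2:].zfill(18)
-- ===== Notes on version B (the rewrite author's own statement) =====
-- stated objective: faster
-- what changed: B replaces A's per-bit re-execution of the mixing loop by a single cycle-detection computation per bit value (a dict records each orbit value's first index and the remaining mixing rounds are skipped via modular arithmetic over the detected period, which is always at most 128 steps), iterates each character's 8 MSB-first bits arithmetically instead of building the intermediate binary string, and drops A's output-irrelevant final state permutation (XOR is commutative).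
import Mathlib
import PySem

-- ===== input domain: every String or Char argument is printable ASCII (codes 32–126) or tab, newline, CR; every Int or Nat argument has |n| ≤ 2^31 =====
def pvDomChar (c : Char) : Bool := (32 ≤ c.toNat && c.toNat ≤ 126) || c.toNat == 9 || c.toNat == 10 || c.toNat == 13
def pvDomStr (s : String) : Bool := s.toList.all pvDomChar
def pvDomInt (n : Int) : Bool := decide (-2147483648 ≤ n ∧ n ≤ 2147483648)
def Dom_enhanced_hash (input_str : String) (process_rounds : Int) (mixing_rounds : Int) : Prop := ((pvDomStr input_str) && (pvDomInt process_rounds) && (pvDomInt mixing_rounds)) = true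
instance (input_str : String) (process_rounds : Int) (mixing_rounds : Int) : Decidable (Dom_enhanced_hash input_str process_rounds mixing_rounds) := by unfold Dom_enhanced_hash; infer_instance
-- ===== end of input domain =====

-- B replaces A's per-bit re-run of the mixing loop by ONE cycle-detection computation per bit value
-- (the mixing orbit is detected with a dict and the remaining rounds are skipped by modular arithmetic),
-- extracts bits arithmetically instead of building the intermediate binary string, and drops the
-- output-irrelevant final permutation (objective: faster — the mixing loop no longer runs per bit).

-- shared low-level helpers (the 128-bit mask, the six initial state words, hex formatting of the result)
def pvMask : Nat := 0xFFFFFFFFFFFFFFFFFFFFFFFFFFFFFFFF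

structure pvState where
  s0 : Nat
  s1 : Nat
  s2 : Nat
  s3 : Nat
  s4 : Nat
  s5 : Nat
deriving DecidableEq, Repr

def pvInit : pvState :=
  ⟨0x87033a211350c9a5682e25cc2fafb24a, 0x3eda649a22357ed19ba54dea2f73d94c,
   0x7edd261d1afd9717422c61f275ec2cb8, 0x37e81ad125b939805a672be0039c902e,
   0x87aa2973de76e28905c6e181d6f0b8f2, 0x2d65153481ad91425f27f25899716593⟩

-- hex(n)[2:] for n ≥ 0: lowercase base-16 digits, '0' for 0 (exact; Nat.toDigits 16 matches)
def pvHex (n : Nat) : List Char := Nat.toDigits 16 n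

-- ===== PORT A =====

-- Python format(n, 08b-spec) for n ≥ 0: base-2 digits ('0' for 0), left-padded with '0' to width 8 (exact)
def pvA_format08b (n : Nat) : List Char :=
  PySem.Chars.zfill (Nat.toDigits 2 n) 8

def pvA_whiten (data : List Char) : List Char :=
  PySem.Chars.join [] (data.map (fun c => pvA_format08b c.toNat))

def pvA_mixing (binary_data : Nat) (rotation_amount : Nat) (rounds : Int) : Nat :=
  (List.range rounds.toNat).foldl (fun original _ =>
    let rotated := ((original <<< rotation_amount) ||| (original >>> (32 - rotation_amount))) &&& pvMask
    original ^^^ rotated) binary_data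

-- one iteration of A's inner 'for char in data' loop; int(char) = char.toNat - 48 (exact on the
-- '0'/'1' digit chars produced by input_whitening)
def pvA_step (rot : Nat) (mr : Int) (st : pvState) (ch : Char) : pvState :=
  let bit : Nat := ch.toNat - 48
  let mixed_data := pvA_mixing bit rot mr
  let a0 := (st.s0 + mixed_data + (st.s1 ^^^ st.s2 ^^^ st.s3)) &&& pvMask
  let a1 := st.s1 ^^^ (bit + a0)
  let a2 := ((a1 <<< 7) ||| (a1 >>> (32 - 7))) &&& pvMask
  let a3 := (a2 + mixed_data * a0 + (st.s5 ^^^ (bit >>> 5) ^^^ (a1 >>> 3))) &&& pvMask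
  let a4 := st.s4 ^^^ (a2 + bit)
  let a5 := ((a4 <<< 11) ||| (a3 >>> (32 - 11))) &&& pvMask
  ⟨a0, a1, a2, a3, a4, a5⟩

def pvA_process (data : List Char) (rot : Nat) (pr mr : Int) : pvState :=
  let st := (List.range pr.toNat).foldl (fun st _ => data.foldl (pvA_step rot mr) st) pvInit
  if rot < 16 then ⟨st.s3, st.s2, st.s1, st.s0, st.s5, st.s4⟩
  else ⟨st.s1, st.s3, st.s5, st.s0, st.s2, st.s4⟩

def pvA_combine (st : pvState) : List Char :=
  PySem.Chars.zfill (pvHex ((st.s0 ^^^ st.s1 ^^^ st.s2 ^^^ st.s3 ^^^ st.s5 ^^^ st.s4) &&& pvMask)) 18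

def enhanced_hash (input_str : String) (process_rounds : Int) (mixing_rounds : Int) : String :=
  let rotation_amount := input_str.toList.length ^ 2 % 32
  String.ofList (pvA_combine (pvA_process (pvA_whiten input_str.toList) rotation_amount process_rounds mixing_rounds))

-- ===== PORT B =====

-- one mixing step: v ^ (((v << rot) | (v >> (32 - rot))) & M)
def pvB_step (rot : Nat) (v : Nat) : Nat :=
  v ^^^ (((v <<< rot) ||| (v >>> (32 - rot))) &&& pvMask)

-- B's while loop of mix_value: iterate f, recording each value's first index in a dict and the
-- sequence in a list; on a repeat, jump to the answer by modular arithmetic over the cycle length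
def pvB_cyc (f : Nat → Nat) (mr : Nat) (k : Nat) (v : Nat)
    (seen : PySem.Dict Nat Nat) (seq : List Nat) : Nat :=
  if _h : k < mr then
    match seen.get? v with
    | some j => seq.getD (j + (mr - j) % (k - j)) 0
    | none => pvB_cyc f mr (k + 1) (f v) (seen.insert v k) (seq ++ [v])
  else v
termination_by mr - k

def pvB_mixValue (rot : Nat) (mr : Int) (start : Nat) : Nat :=
  pvB_cyc (pvB_step rot) mr.toNat 0 start PySem.Dict.empty []

-- one bit of B's innermost loop; md = mixed[bit]
def pvB_bitStep (m0 m1 : Nat) (st : pvState) (bit : Nat) : pvState :=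
  let md := if bit = 1 then m1 else m0
  let b0 := (st.s0 + md + (st.s1 ^^^ st.s2 ^^^ st.s3)) &&& pvMask
  let b1 := st.s1 ^^^ (bit + b0)
  let b2 := ((b1 <<< 7) ||| (b1 >>> 25)) &&& pvMask
  let b3 := (b2 + md * b0 + (st.s5 ^^^ (b1 >>> 3))) &&& pvMask
  let b4 := st.s4 ^^^ (b2 + bit)
  let b5 := ((b4 <<< 11) ||| (b3 >>> 21)) &&& pvMask
  ⟨b0, b1, b2, b3, b4, b5⟩

def pvB_charStep (m0 m1 : Nat) (st : pvState) (c : Char) : pvState :=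
  (List.range 8).foldl (fun st i => pvB_bitStep m0 m1 st ((c.toNat >>> (7 - i)) &&& 1)) st

def enhanced_hash_alt (input_str : String) (process_rounds : Int) (mixing_rounds : Int) : String :=
  let rot := input_str.toList.length ^ 2 % 32
  let m0 := pvB_mixValue rot mixing_rounds 0
  let m1 := pvB_mixValue rot mixing_rounds 1
  let st := (List.range process_rounds.toNat).foldl
      (fun st _ => input_str.toList.foldl (pvB_charStep m0 m1) st) pvInit
  String.ofList (PySem.Chars.zfill (pvHex ((st.s0 ^^^ st.s1 ^^^ st.s2 ^^^ st.s3 ^^^ st.s4 ^^^ st.s5) &&& pvMask)) 18)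

-- ===== PRECONDITION & SPEC =====
def Spec_enhanced_hash (input_str : String) (process_rounds : Int) (mixing_rounds : Int) (out : String) : Prop := out = enhanced_hash_alt input_str process_rounds mixing_rounds
instance (input_str : String) (process_rounds : Int) (mixing_rounds : Int) (out : String) : Decidable (Spec_enhanced_hash input_str process_rounds mixing_rounds out) := by unfold Spec_enhanced_hash; infer_instance

-- ===== CLAIM (what is proved, stated in full; the proofs are below) =====
def Claim_equal_enhanced_hash : Prop := ∀ (input_str : String) (process_rounds : Int) (mixing_rounds : Int), Dom_enhanced_hash input_str process_rounds mixing_rounds → Spec_enhanced_hash input_str process_rounds mixing_rounds (enhanced_hash input_str process_rounds mixing_rounds)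

-- ===== LEMMAS AND PROOFS =====

-- a fixed point of period p lets any iterate be reduced mod p
theorem pv_iter_mod (f : Nat → Nat) (x p : Nat) (hp : 0 < p) (hfix : f^[p] x = x) :
    ∀ m, f^[m] x = f^[m % p] x := by
  intro m
  induction m using Nat.strong_induction_on with
  | _ m ih =>
    by_cases hm : m < p
    · rw [Nat.mod_eq_of_lt hm]
    · have h1 : m = (m - p) + p := by omega
      have h2 : (m - p) % p = m % p := by
        conv_rhs => rw [h1]
        rw [Nat.add_mod_right]
      calc f^[m] x = f^[(m - p) + p] x := by rw [← h1]
        _ = f^[m - p] (f^[p] x) := by rw [Function.iterate_add_apply]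
        _ = f^[m - p] x := by rw [hfix]
        _ = f^[(m - p) % p] x := ih (m - p) (by omega)
        _ = f^[m % p] x := by rw [h2]

-- a repeated value in the orbit gives f^[n] b by a modular jump
theorem pv_iter_period (f : Nat → Nat) (b j k : Nat) (hjk : j < k)
    (h : f^[j] b = f^[k] b) (n : Nat) (hn : j ≤ n) :
    f^[n] b = f^[j + (n - j) % (k - j)] b := by
  have hsplit : n = (n - j) + j := by omega
  have hfix : f^[k - j] (f^[j] b) = f^[j] b := by
    rw [← Function.iterate_add_apply]
    have : k - j + j = k := by omega
    rw [this, h]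
  calc f^[n] b = f^[(n - j) + j] b := by rw [← hsplit]
    _ = f^[n - j] (f^[j] b) := by rw [Function.iterate_add_apply]
    _ = f^[(n - j) % (k - j)] (f^[j] b) := pv_iter_mod f (f^[j] b) (k - j) (by omega) hfix _
    _ = f^[(n - j) % (k - j) + j] b := by rw [← Function.iterate_add_apply]
    _ = f^[j + (n - j) % (k - j)] b := by rw [Nat.add_comm]

-- the cycle-detecting loop computes exactly f^[mr] b
theorem pv_cyc_correct (f : Nat → Nat) (b mr : Nat) :
    ∀ n k v seen seq, mr - k ≤ n → k ≤ mr → seq.length = k → v = f^[k] b →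
    (∀ i, i < k → seq.getD i 0 = f^[i] b) →
    (∀ x j, PySem.Dict.get? seen x = some j → j < k ∧ f^[j] b = x) →
    pvB_cyc f mr k v seen seq = f^[mr] b := by
  intro n
  induction n with
  | zero =>
    intro k v seen seq hn hk hlen hv _ _
    have hkm : k = mr := by omega
    rw [pvB_cyc, dif_neg (by omega)]
    rw [hv, hkm]
  | succ n ih =>
    intro k v seen seq hn hk hlen hv hseq hseen
    by_cases hkm : k < mr
    · rw [pvB_cyc, dif_pos hkm]
      cases hget : PySem.Dict.get? seen v with
      | some j =>
        dsimp only
        obtain ⟨hj, hjb⟩ := hseen v j hget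
        have hrep : f^[j] b = f^[k] b := by rw [hjb, hv]
        have hidx : j + (mr - j) % (k - j) < k := by
          have := Nat.mod_lt (mr - j) (y := k - j) (by omega)
          omega
        rw [hseq _ hidx]
        exact (pv_iter_period f b j k hj hrep mr (by omega)).symm
      | none =>
        dsimp only
        apply ih (k + 1) (f v) (seen.insert v k) (seq ++ [v]) (by omega) (by omega)
        · simp [hlen]
        · rw [hv]
          exact (Function.iterate_succ_apply' f k b).symm
        · intro i hi
          by_cases hik : i < k
          · rw [List.getD_append _ _ _ _ (by omega), hseq i hik]
          · have hik2 : i = k := by omega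
            subst hik2
            rw [List.getD_append_right _ _ _ _ (by omega)]
            simp [hlen, hv]
        · intro x j hx
          rw [PySem.Dict.get?_insert] at hx
          by_cases hxv : x = v
          · rw [if_pos hxv] at hx
            injection hx with hjk2
            refine ⟨by omega, ?_⟩
            rw [hxv, hv, hjk2]
          · rw [if_neg hxv] at hx
            obtain ⟨h1, h2⟩ := hseen x j hx
            exact ⟨by omega, h2⟩
    · rw [pvB_cyc, dif_neg hkm]
      have hkm2 : k = mr := by omega
      rw [hv, hkm2]

-- A's mixing loop is iteration of pvB_step
theorem pv_mixing_iter (b rot : Nat) (mr : Int) :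
    pvA_mixing b rot mr = (pvB_step rot)^[mr.toNat] b := by
  unfold pvA_mixing
  induction mr.toNat with
  | zero => rfl
  | succ n ih =>
    rw [List.range_succ, List.foldl_append, ih, Function.iterate_succ_apply']
    rfl

-- B's mix_value equals A's mixing
theorem pv_mixValue_eq (rot : Nat) (mr : Int) (b : Nat) :
    pvB_mixValue rot mr b = pvA_mixing b rot mr := by
  rw [pv_mixing_iter]
  unfold pvB_mixValue
  apply pv_cyc_correct (pvB_step rot) b mr.toNat mr.toNat 0 b PySem.Dict.empty []
  · omega
  · omega
  · rfl
  · rfl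
  · intro i hi; omega
  · intro x j hx
    simp [PySem.Dict.empty, PySem.Dict.get?] at hx

-- the whitening of one ASCII char is its 8 bits, MSB first (finite check over the byte range)
set_option maxHeartbeats 1000000 in
theorem pv_format08b_bits : ∀ n < 128,
    pvA_format08b n = (List.range 8).map (fun i => if (n >>> (7 - i)) &&& 1 = 1 then '1' else '0') := by
  decide

theorem pv_join_nil_flatten (l : List (List Char)) : PySem.Chars.join [] l = l.flatten := by
  induction l with
  | nil => simp [PySem.Chars.join_nil]
  | cons p rest ih =>
    cases rest with
    | nil => simp [PySem.Chars.join_singleton]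
    | cons q r => simp [PySem.Chars.join_cons_cons, ih]

-- the per-bit state updates agree for bit ∈ {0,1}
theorem pv_step_eq (rot : Nat) (mr : Int) (st : pvState) (b : Nat) (hb : b = 0 ∨ b = 1) :
    pvA_step rot mr st (if b = 1 then '1' else '0') =
    pvB_bitStep (pvB_mixValue rot mr 0) (pvB_mixValue rot mr 1) st b := by
  rcases hb with h | h <;> subst h <;>
    simp [pvA_step, pvB_bitStep, pv_mixValue_eq]

-- one character of A's whitened-string loop = B's 8-bit inner loop
theorem pv_char_eq (rot : Nat) (mr : Int) (c : Char) (hc : c.toNat < 128) (st : pvState) :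
    (pvA_format08b c.toNat).foldl (pvA_step rot mr) st =
    pvB_charStep (pvB_mixValue rot mr 0) (pvB_mixValue rot mr 1) st c := by
  rw [pv_format08b_bits c.toNat hc, List.foldl_map, pvB_charStep]
  apply PySem.List.foldl_congr_mem
  intro acc i _
  have h2 : (c.toNat >>> (7 - i)) &&& 1 = 0 ∨ (c.toNat >>> (7 - i)) &&& 1 = 1 := by
    have := Nat.and_one_is_mod (c.toNat >>> (7 - i))
    omega
  exact pv_step_eq rot mr acc _ h2

-- one full round over the data
theorem pv_round_eq (rot : Nat) (mr : Int) (data : List Char)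
    (hd : ∀ c ∈ data, c.toNat < 128) (st : pvState) :
    (pvA_whiten data).foldl (pvA_step rot mr) st =
    data.foldl (pvB_charStep (pvB_mixValue rot mr 0) (pvB_mixValue rot mr 1)) st := by
  rw [pvA_whiten, pv_join_nil_flatten, List.foldl_flatten, List.foldl_map]
  apply PySem.List.foldl_congr_mem
  intro acc c hc
  exact pv_char_eq rot mr c (hd c hc) acc

theorem pv_xor6_1 (a b c d e f : Nat) : d ^^^ c ^^^ b ^^^ a ^^^ e ^^^ f = a ^^^ b ^^^ c ^^^ d ^^^ e ^^^ f := by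
  simp [Nat.xor_comm, Nat.xor_left_comm]

theorem pv_xor6_2 (a b c d e f : Nat) : b ^^^ d ^^^ f ^^^ a ^^^ e ^^^ c = a ^^^ b ^^^ c ^^^ d ^^^ e ^^^ f := by
  simp [Nat.xor_comm, Nat.xor_left_comm]

theorem pv_dom_chars (s : String) (h : pvDomStr s = true) : ∀ c ∈ s.toList, c.toNat < 128 := by
  intro c hc
  have := (List.all_eq_true.mp h) c hc
  simp [pvDomChar] at this
  omega

theorem pv_perm_xor (rot : Nat) (st : pvState) :
    String.ofList (pvA_combine (if rot < 16 then ⟨st.s3, st.s2, st.s1, st.s0, st.s5, st.s4⟩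
      else ⟨st.s1, st.s3, st.s5, st.s0, st.s2, st.s4⟩ : pvState)) =
    String.ofList (PySem.Chars.zfill (pvHex ((st.s0 ^^^ st.s1 ^^^ st.s2 ^^^ st.s3 ^^^ st.s4 ^^^ st.s5) &&& pvMask)) 18) := by
  unfold pvA_combine
  split
  · rw [pv_xor6_1 st.s0 st.s1 st.s2 st.s3 st.s4 st.s5]
  · rw [pv_xor6_2 st.s0 st.s1 st.s2 st.s3 st.s4 st.s5]

-- ===== VERDICT (by name: the statement is the Claim_ definition above) =====
theorem enhanced_hash_spec : Claim_equal_enhanced_hash := by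
  intro s pr mr hdom
  have hs : pvDomStr s = true := by
    unfold Dom_enhanced_hash at hdom
    simp at hdom
    exact hdom.1.1
  have hd := pv_dom_chars s hs
  unfold Spec_enhanced_hash enhanced_hash enhanced_hash_alt pvA_process
  dsimp only
  rw [PySem.List.foldl_congr_mem (List.range pr.toNat) _ _ pvInit
      (fun acc _ _ => pv_round_eq _ mr s.toList hd acc)]
  exact pv_perm_xor _ _
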